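-- pv_equiv track=rewrite | github.com/BrettRey/erdos-problem-993 | experiment_sensitivity.py | build_multiarm_star
-- ===== SOURCE A (Python) =====
-- def build_multiarm_star(s, arms):
--     """Build adjacency list for M(s; a1, ..., ak)."""
--     n = 1 + s + sum(arms)
--     adj = [[] for _ in range(n)]
--     hub = 0
--     v = 1
--     for _ in range(s):
--         adj[hub].append(v)
--         adj[v].append(hub)
--         v += 1
--     for a in arms:
--         prev = hub
--         for _ in range(a):
--             adj[prev].append(v)
--             adj[v].append(prev)
--             prev = v
--             v += 1
--     return n, adj
-- ===== SOURCE B (Python) =====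
-- def build_multiarm_star(s, arms):
--     """Build adjacency list for M(s; a1, ..., ak)."""
--     n = 1 + s + sum(arms)
--     # cumulative arm boundaries: 1+s and the running total after each arm
--     cuts = {1 + s}
--     t = 1 + s
--     for a in arms:
--         t += a
--         cuts.add(t)
--     adj = [[] for _ in range(n)]
--     if n > 0:
--         adj[0] = list(range(1, s + 1)) + [w for w in range(s + 1, n) if w in cuts]
--     for v in range(1, s + 1):
--         adj[v] = [0]
--     for v in range(s + 1, n):
--         adj[v] = ([0] if v in cuts else [v - 1]) + ([] if v + 1 in cuts else [v + 1])
--     return n, adj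
-- ===== Notes on version B (the rewrite author's own statement) =====
-- stated objective: alternative
-- what changed: B never simulates edge insertions: it precomputes the set of cumulative arm-boundary indices and then writes each vertex's adjacency row exactly once by a closed-form classification (hub row = spokes plus the boundary indices in the arm region; spoke rows = [0]; an arm vertex's row = predecessor 0 at a boundary, else v-1, plus v+1 unless v+1 is a boundary), instead of A's interleaved appends driven by a running vertex counter.
import Mathlib
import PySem

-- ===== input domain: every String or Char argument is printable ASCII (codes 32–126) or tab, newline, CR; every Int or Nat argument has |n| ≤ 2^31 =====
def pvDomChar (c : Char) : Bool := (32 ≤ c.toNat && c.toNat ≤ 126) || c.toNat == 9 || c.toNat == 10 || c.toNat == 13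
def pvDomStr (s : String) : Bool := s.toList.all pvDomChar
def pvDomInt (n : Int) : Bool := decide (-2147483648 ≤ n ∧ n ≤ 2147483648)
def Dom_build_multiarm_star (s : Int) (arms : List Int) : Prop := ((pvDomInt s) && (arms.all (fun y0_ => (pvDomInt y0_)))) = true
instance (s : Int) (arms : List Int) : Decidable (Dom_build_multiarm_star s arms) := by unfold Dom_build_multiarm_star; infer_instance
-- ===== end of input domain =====

-- B writes each adjacency row exactly once, computed in closed form from the set of cumulative
-- arm boundaries, instead of A's interleaved edge appends driven by a running vertex counter.

-- shared primitive: the two Python statements 'adj[u].append(w); adj[w].append(u)'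
-- (total via List.modify; Pre_ keeps all indices in range, where this is Python-exact)
def pvAppendBoth (adj : List (List Int)) (u w : Int) : List (List Int) :=
  (adj.modify u.toNat (fun l => l ++ [w])).modify w.toNat (fun l => l ++ [u])

-- ===== PORT A =====
def build_multiarm_star (s : Int) (arms : List Int) : Int × List (List Int) :=
  let n : Int := 1 + s + arms.sum
  let adj : List (List Int) := (List.range n.toNat).map (fun _ => ([] : List Int))
  let st1 : List (List Int) × Int :=
    (List.range s.toNat).foldl (fun st _ => (pvAppendBoth st.1 0 st.2, st.2 + 1)) (adj, 1)
  let st2 : List (List Int) × Int :=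
    arms.foldl (fun st a =>
      let inner := (List.range a.toNat).foldl
        (fun (q : List (List Int) × Int × Int) _ =>
          (pvAppendBoth q.1 q.2.1 q.2.2, q.2.2, q.2.2 + 1))
        (st.1, 0, st.2)
      (inner.1, inner.2.2)) st1
  (n, st2.1)

-- ===== PORT B =====
def build_multiarm_star_alt (s : Int) (arms : List Int) : Int × List (List Int) :=
  let n : Int := 1 + s + arms.sum
  let cuts : PySem.Set Int :=
    (arms.foldl (fun (p : PySem.Set Int × Int) a =>
        (PySem.Set.add p.1 (p.2 + a), p.2 + a)) (PySem.Set.ofList [1 + s], 1 + s)).1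
  let adj1 : List (List Int) := (List.range n.toNat).map (fun _ => ([] : List Int))
  let adj2 : List (List Int) :=
    if 0 < n then
      PySem.List.pySetD adj1 0
        (PySem.List.pyRange 1 (s + 1) 1
          ++ (PySem.List.pyRange (s + 1) n 1).filter (fun w => PySem.Set.contains cuts w))
    else adj1
  let adj3 : List (List Int) :=
    (PySem.List.pyRange 1 (s + 1) 1).foldl (fun acc v => PySem.List.pySetD acc v [0]) adj2
  let adj4 : List (List Int) :=
    (PySem.List.pyRange (s + 1) n 1).foldl
      (fun acc v => PySem.List.pySetD acc v
        ((if PySem.Set.contains cuts v then [0] else [v - 1])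
          ++ (if !PySem.Set.contains cuts (v + 1) then [v + 1] else []))) adj3
  (n, adj4)

-- ===== PRECONDITION & SPEC =====
-- Pre_ is exactly the inputs on which A returns: with mixed signs the vertex counter runs past
-- the adjacency list and A raises IndexError; in the all-nonpositive case no edge is emitted.
def Pre_build_multiarm_star (s : Int) (arms : List Int) : Prop :=
  (0 ≤ s ∧ ∀ a ∈ arms, 0 ≤ a) ∨ (s ≤ 0 ∧ ∀ a ∈ arms, a ≤ 0)
instance (s : Int) (arms : List Int) : Decidable (Pre_build_multiarm_star s arms) := by
  unfold Pre_build_multiarm_star; infer_instance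

def pvWitness_build_multiarm_star : Int × List Int := (2, [3, 0, 1])

def Spec_build_multiarm_star (s : Int) (arms : List Int) (out : Int × List (List Int)) : Prop := out = build_multiarm_star_alt s arms
instance (s : Int) (arms : List Int) (out : Int × List (List Int)) : Decidable (Spec_build_multiarm_star s arms out) := by unfold Spec_build_multiarm_star; infer_instance

-- ===== CLAIM (what is proved, stated in full; the proofs are below) =====
def Claim_equal_build_multiarm_star : Prop := ∀ (s : Int) (arms : List Int), Dom_build_multiarm_star s arms → Pre_build_multiarm_star s arms → Spec_build_multiarm_star s arms (build_multiarm_star s arms)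

-- ===== LEMMAS AND PROOFS =====

-- the edge sequence of one arm of length k: (p,v),(v,v+1),…
def pvChainEdges : Int → Int → Nat → List (Int × Int)
  | _, _, 0 => []
  | p, v, k + 1 => (p, v) :: pvChainEdges v (v + 1) k

-- spoke edges (0,v),(0,v+1),… (k of them)
def pvSpokeEdges : Int → Nat → List (Int × Int)
  | _, 0 => []
  | v, k + 1 => (0, v) :: pvSpokeEdges (v + 1) k

-- edge sequence of all arms, vertices numbered from v (nonnegative arms)
def pvArmEdges : List Int → Int → List (Int × Int)
  | [], _ => []
  | a :: rest, v => pvChainEdges 0 v a.toNat ++ pvArmEdges rest (v + a)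

def pvStep (acc : List (List Int)) (e : Int × Int) : List (List Int) :=
  pvAppendBoth acc e.1 e.2

-- what one index accumulates from an edge list
def pvContrib (x : Int) (E : List (Int × Int)) : List Int :=
  E.flatMap (fun e => (if e.1 = x then [e.2] else []) ++ (if e.2 = x then [e.1] else []))

-- the cumulative boundary values v, v+a1, v+a1+a2, …
def pvSums : List Int → Int → List Int
  | [], v => [v]
  | a :: r, v => v :: pvSums r (v + a)

-- the values B's fold adds to the cuts set (pvSums without its head)
def pvTailSums : List Int → Int → List Int
  | [], _ => []
  | a :: r, t => (t + a) :: pvTailSums r (t + a)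

-- start vertices of the arms of positive length, in arm order
def pvPosStarts : List Int → Int → List Int
  | [], _ => []
  | a :: r, v => (if 0 < a then [v] else []) ++ pvPosStarts r (v + a)

-- ---------- A-side: the loops are folds of pvStep over explicit edge lists ----------

lemma pv_A_spokes (k : Nat) : ∀ (adj : List (List Int)) (v : Int),
    (List.range k).foldl (fun st _ => (pvAppendBoth st.1 0 st.2, st.2 + 1)) (adj, v)
      = ((pvSpokeEdges v k).foldl pvStep adj, v + k) := by
  induction k with
  | zero => intro adj v; simp [pvSpokeEdges]
  | succ k ih =>
    intro adj v
    rw [List.range_succ_eq_map]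
    simp only [List.foldl_cons, List.foldl_map]
    rw [ih (pvAppendBoth adj 0 v) (v + 1)]
    simp [pvSpokeEdges, pvStep]
    ring

lemma pv_A_inner (k : Nat) : ∀ (adj : List (List Int)) (p v : Int),
    (List.range k).foldl
        (fun (q : List (List Int) × Int × Int) _ => (pvAppendBoth q.1 q.2.1 q.2.2, q.2.2, q.2.2 + 1))
        (adj, p, v)
      = ((pvChainEdges p v k).foldl pvStep adj,
         (if k = 0 then p else v + k - 1), v + k) := by
  induction k with
  | zero => intro adj p v; simp [pvChainEdges]
  | succ k ih =>
    intro adj p v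
    rw [List.range_succ_eq_map]
    simp only [List.foldl_cons, List.foldl_map]
    rw [ih (pvAppendBoth adj p v) v (v + 1)]
    rcases Nat.eq_zero_or_pos k with hk | hk
    · subst hk; simp [pvChainEdges, pvStep]
    · have : k ≠ 0 := by omega
      simp [pvChainEdges, pvStep, this]
      all_goals omega

lemma pv_A_arms (arms : List Int) : ∀ (adj : List (List Int)) (v : Int),
    (∀ a ∈ arms, 0 ≤ a) →
    arms.foldl (fun st a =>
        let inner := (List.range a.toNat).foldl
          (fun (q : List (List Int) × Int × Int) _ =>
            (pvAppendBoth q.1 q.2.1 q.2.2, q.2.2, q.2.2 + 1))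
          (st.1, 0, st.2)
        (inner.1, inner.2.2)) (adj, v)
      = ((pvArmEdges arms v).foldl pvStep adj, v + arms.sum) := by
  induction arms with
  | nil => intro adj v _; simp [pvArmEdges]
  | cons a rest ih =>
    intro adj v h
    have ha : (0 : Int) ≤ a := h a (by simp)
    simp only [List.foldl_cons]
    rw [pv_A_inner]
    rw [ih _ (v + (a.toNat : Int)) (fun x hx => h x (by simp [hx]))]
    have hcast : (a.toNat : Int) = a := Int.toNat_of_nonneg ha
    simp [pvArmEdges, hcast, List.foldl_append, List.sum_cons]
    ring

-- ---------- the per-index content of a fold of pvStep ----------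

lemma pv_length_step (adj : List (List Int)) (e : Int × Int) :
    (pvStep adj e).length = adj.length := by
  simp [pvStep, pvAppendBoth]

lemma pv_length_fold (E : List (Int × Int)) : ∀ (adj : List (List Int)),
    (E.foldl pvStep adj).length = adj.length := by
  induction E with
  | nil => intro adj; rfl
  | cons e E ih => intro adj; rw [List.foldl_cons, ih, pv_length_step]

lemma pv_fold_getD (E : List (Int × Int)) : ∀ (adj : List (List Int)),
    (∀ e ∈ E, 0 ≤ e.1 ∧ e.1 < (adj.length : Int) ∧ 0 ≤ e.2 ∧ e.2 < (adj.length : Int) ∧ e.1 ≠ e.2) →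
    ∀ i : Nat, i < adj.length →
    (E.foldl pvStep adj).getD i [] = adj.getD i [] ++ pvContrib (i : Int) E := by
  induction E with
  | nil => intro adj _ i _; simp [pvContrib]
  | cons e E ih =>
    intro adj hE i hi
    obtain ⟨h1, h2, h3, h4, hne⟩ := hE e (by simp)
    have hlen : (pvStep adj e).length = adj.length := pv_length_step adj e
    rw [List.foldl_cons, ih (pvStep adj e)
      (fun e' he' => by rw [hlen]; exact hE e' (by simp [he'])) i (by omega)]
    have hstep : (pvStep adj e).getD i []
        = adj.getD i [] ++ ((if e.1 = (i : Int) then [e.2] else []) ++ (if e.2 = (i : Int) then [e.1] else [])) := by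
      have hne' : e.1.toNat ≠ e.2.toNat := by omega
      have g1 : e.1 = (i : Int) ↔ e.1.toNat = i := by omega
      have g2 : e.2 = (i : Int) ↔ e.2.toNat = i := by omega
      simp only [pvStep, pvAppendBoth]
      by_cases c2 : e.2.toNat = i
      · have c1 : ¬ e.1.toNat = i := by omega
        rw [List.getD_eq_getElem?_getD, List.getElem?_modify, List.getElem?_modify]
        simp [c1, c2, g1, g2, List.getElem?_eq_getElem (by omega : i < adj.length),
          List.getD_eq_getElem?_getD]
      · rw [List.getD_eq_getElem?_getD, List.getElem?_modify, List.getElem?_modify]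
        by_cases c1 : e.1.toNat = i
        · simp [c1, c2, g1, g2, List.getElem?_eq_getElem (by omega : i < adj.length),
            List.getD_eq_getElem?_getD]
        · simp [c1, c2, g1, g2, List.getElem?_eq_getElem (by omega : i < adj.length),
            List.getD_eq_getElem?_getD]
    rw [hstep]
    simp [pvContrib, List.append_assoc]

-- ---------- contributions of the concrete edge lists ----------

lemma pv_contrib_append (x : Int) (E1 E2 : List (Int × Int)) :
    pvContrib x (E1 ++ E2) = pvContrib x E1 ++ pvContrib x E2 := by
  simp [pvContrib]

lemma pv_contrib_spokes_hub (k : Nat) : ∀ v : Int, 1 ≤ v →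
    pvContrib 0 (pvSpokeEdges v k) = PySem.List.pyRange v (v + k) 1 := by
  induction k with
  | zero => intro v _; simp [pvSpokeEdges, pvContrib, PySem.List.pyRange_one_eq_nil (le_refl v)]
  | succ k ih =>
    intro v hv
    have hcons : PySem.List.pyRange v (v + ((k + 1 : Nat) : Int)) 1
        = v :: PySem.List.pyRange (v + 1) (v + ((k + 1 : Nat) : Int)) 1 :=
      PySem.List.pyRange_one_cons (by push_cast; omega)
    have harg : v + ((k + 1 : Nat) : Int) = (v + 1) + (k : Int) := by push_cast; ring
    rw [hcons, harg]
    have hvne : v ≠ 0 := by omega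
    simp only [pvSpokeEdges, pvContrib, List.flatMap_cons] at *
    simp [hvne, ih (v + 1) (by omega)]

lemma pv_contrib_spokes (k : Nat) : ∀ (v x : Int), 1 ≤ v → x ≠ 0 →
    pvContrib x (pvSpokeEdges v k) = if v ≤ x ∧ x < v + k then [0] else [] := by
  induction k with
  | zero => intro v x _ _; simp [pvSpokeEdges, pvContrib]
  | succ k ih =>
    intro v x hv hx
    simp only [pvSpokeEdges, pvContrib, List.flatMap_cons]
    rw [show (pvSpokeEdges (v+1) k).flatMap
        (fun e => (if e.1 = x then [e.2] else []) ++ (if e.2 = x then [e.1] else []))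
        = pvContrib x (pvSpokeEdges (v+1) k) from rfl, ih (v+1) x (by omega) hx]
    rw [if_neg (show ¬(0:Int) = x from fun h => hx h.symm)]
    by_cases hvx : v = x
    · rw [if_pos hvx,
        if_neg (show ¬(v + 1 ≤ x ∧ x < v + 1 + (k:Int)) from by omega),
        if_pos (show v ≤ x ∧ x < v + ((k+1 : Nat):Int) from by push_cast; omega)]
      simp
    · rw [if_neg hvx]
      simp only [List.nil_append]
      split_ifs with h1 h2 h2 <;> first | rfl | (exfalso; push_cast at *; omega)

lemma pv_contrib_chain_empty (k : Nat) : ∀ (p v x : Int), x ≠ p → (x < v ∨ v + k ≤ x) →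
    pvContrib x (pvChainEdges p v k) = [] := by
  induction k with
  | zero => intro p v x _ _; simp [pvChainEdges, pvContrib]
  | succ k ih =>
    intro p v x hp hr
    have hxv : x ≠ v := by push_cast at hr; omega
    simp only [pvChainEdges, pvContrib, List.flatMap_cons]
    rw [show (pvChainEdges v (v+1) k).flatMap
        (fun e => (if e.1 = x then [e.2] else []) ++ (if e.2 = x then [e.1] else []))
        = pvContrib x (pvChainEdges v (v+1) k) from rfl,
      ih v (v+1) x hxv (by push_cast at *; omega)]
    rw [if_neg (fun h => hp h.symm), if_neg (fun h => hxv h.symm)]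
    rfl

lemma pv_contrib_chain_head (k : Nat) : ∀ (p v : Int), p < v →
    pvContrib p (pvChainEdges p v k) = if 0 < k then [v] else [] := by
  intro p v hpv
  cases k with
  | zero => simp [pvChainEdges, pvContrib]
  | succ k =>
    simp only [pvChainEdges, pvContrib, List.flatMap_cons]
    rw [show (pvChainEdges v (v+1) k).flatMap
        (fun e => (if e.1 = p then [e.2] else []) ++ (if e.2 = p then [e.1] else []))
        = pvContrib p (pvChainEdges v (v+1) k) from rfl,
      pv_contrib_chain_empty k v (v+1) p (by omega) (by omega)]
    rw [if_neg (by omega : ¬ v = p)]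
    simp

lemma pv_contrib_chain (k : Nat) : ∀ (p v x : Int), p < v → v ≤ x → x < v + k →
    pvContrib x (pvChainEdges p v k)
      = [if x = v then p else x - 1] ++ (if x + 1 < v + k then [x + 1] else []) := by
  induction k with
  | zero => intro p v x _ h1 h2; push_cast at h2; omega
  | succ k ih =>
    intro p v x hpv h1 h2
    simp only [pvChainEdges, pvContrib, List.flatMap_cons]
    rw [show (pvChainEdges v (v+1) k).flatMap
        (fun e => (if e.1 = x then [e.2] else []) ++ (if e.2 = x then [e.1] else []))
        = pvContrib x (pvChainEdges v (v+1) k) from rfl]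
    by_cases hxv : x = v
    · subst hxv
      rw [pv_contrib_chain_head k x (x+1) (by omega)]
      rw [if_neg (by omega : ¬ p = x), if_pos rfl, if_pos rfl]
      by_cases hk : 0 < k
      · rw [if_pos hk, if_pos (show x + 1 < x + ((k+1:Nat):Int) from by push_cast; omega)]
        rfl
      · rw [if_neg hk, if_neg (show ¬ x + 1 < x + ((k+1:Nat):Int) from by push_cast; omega)]
        rfl
    · rw [ih v (v+1) x (by omega) (by omega) (by push_cast at *; omega)]
      rw [if_neg (by omega : ¬ p = x), if_neg (fun h => hxv h.symm), if_neg hxv]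
      simp only [List.nil_append]
      have e1 : (if x = v + 1 then v else x - 1) = x - 1 := by split_ifs <;> omega
      rw [e1]
      have e2 : (x + 1 < v + 1 + (k:Int)) ↔ (x + 1 < v + ((k+1:Nat):Int)) := by push_cast; omega
      rw [if_congr e2 rfl rfl]

-- ---------- arm-edge contributions against the boundary sums ----------

lemma pv_sums_head (arms : List Int) (v : Int) : v ∈ pvSums arms v := by
  cases arms <;> simp [pvSums]

lemma pv_sums_min (arms : List Int) : ∀ (v y : Int), (∀ a ∈ arms, 0 ≤ a) →
    y ∈ pvSums arms v → v ≤ y := by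
  induction arms with
  | nil => intro v y _ h; simp [pvSums] at h; omega
  | cons a r ih =>
    intro v y h hy
    have ha : (0:Int) ≤ a := h a (by simp)
    simp [pvSums] at hy
    rcases hy with hy | hy
    · omega
    · have := ih (v + a) y (fun x hx => h x (by simp [hx])) hy; omega

lemma pv_contrib_arms_empty (arms : List Int) : ∀ (v x : Int), (∀ a ∈ arms, 0 ≤ a) →
    x ≠ 0 → x < v → pvContrib x (pvArmEdges arms v) = [] := by
  induction arms with
  | nil => intro v x _ _ _; simp [pvArmEdges, pvContrib]
  | cons a r ih =>
    intro v x h hx hv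
    have ha : (0:Int) ≤ a := h a (by simp)
    simp only [pvArmEdges, pv_contrib_append]
    rw [pv_contrib_chain_empty _ 0 v x hx (by omega),
      ih (v + a) x (fun y hy => h y (by simp [hy])) hx (by omega)]
    rfl

lemma pv_contrib_arms_hub (arms : List Int) : ∀ (v : Int), (∀ a ∈ arms, 0 ≤ a) → 1 ≤ v →
    pvContrib 0 (pvArmEdges arms v) = pvPosStarts arms v := by
  induction arms with
  | nil => intro v _ _; simp [pvArmEdges, pvContrib, pvPosStarts]
  | cons a r ih =>
    intro v h hv
    have ha : (0:Int) ≤ a := h a (by simp)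
    simp only [pvArmEdges, pv_contrib_append, pvPosStarts]
    rw [pv_contrib_chain_head _ 0 v (by omega), ih (v + a) (fun y hy => h y (by simp [hy])) (by omega)]
    congr 1
    split_ifs with h1 h2 h2 <;> first | rfl | omega

lemma pv_contrib_arms (arms : List Int) : ∀ (v x : Int), (∀ a ∈ arms, 0 ≤ a) → 1 ≤ v →
    v ≤ x → x < v + arms.sum →
    pvContrib x (pvArmEdges arms v)
      = [if x ∈ pvSums arms v then 0 else x - 1]
        ++ (if x + 1 ∈ pvSums arms v then [] else [x + 1]) := by
  induction arms with
  | nil => intro v x _ _ h1 h2; simp [List.sum_nil] at h2; omega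
  | cons a r ih =>
    intro v x h hv h1 h2
    have ha : (0:Int) ≤ a := h a (by simp)
    have hr : ∀ y ∈ r, (0:Int) ≤ y := fun y hy => h y (by simp [hy])
    have hsum : (0:Int) ≤ r.sum := List.sum_nonneg hr
    have hmin : ∀ y ∈ pvSums r (v + a), v + a ≤ y := fun y hy => pv_sums_min r (v + a) y hr hy
    have h2' : x < v + (a + r.sum) := by rw [List.sum_cons] at h2; exact h2
    simp only [pvArmEdges, pv_contrib_append, pvSums]
    by_cases hxa : x < v + a
    · -- x lies in this arm's chain
      rw [pv_contrib_chain a.toNat 0 v x (by omega) h1 (by omega),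
        pv_contrib_arms_empty r (v + a) x hr (by omega) (by omega)]
      have hnm : x ∉ pvSums r (v + a) := fun hc => by have := hmin x hc; omega
      have hm : (x ∈ v :: pvSums r (v + a)) ↔ x = v := by simp [hnm]
      by_cases hsucc : x + 1 < v + a
      · have hnm1 : x + 1 ∉ pvSums r (v + a) := fun hc => by have := hmin _ hc; omega
        have hm1 : x + 1 ∉ (v :: pvSums r (v + a)) := by simp [hnm1]; omega
        simp only [List.append_nil]
        rw [if_pos (by omega : x + 1 < v + (a.toNat:Int)), if_neg hm1]
        congr 1
        simp [hm]
      · have heq : x + 1 = v + a := by omega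
        have hm1 : x + 1 ∈ (v :: pvSums r (v + a)) := by
          simp [heq, pv_sums_head r (v + a)]
        simp only [List.append_nil]
        rw [if_neg (by omega : ¬ x + 1 < v + (a.toNat:Int)), if_pos hm1]
        congr 1
        simp [hm]
    · -- x lies in a later arm
      rw [pv_contrib_chain_empty a.toNat 0 v x (by omega) (by omega)]
      rw [ih (v + a) x hr (by omega) (by omega) (by omega)]
      have hmem : ∀ y : Int, v + a ≤ y → ((y ∈ v :: pvSums r (v + a)) ↔ y ∈ pvSums r (v + a)) := by
        intro y hy
        constructor
        · intro hc
          rcases List.mem_cons.mp hc with hc | hc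
          · subst hc
            have : a = 0 := by omega
            subst this
            simpa using pv_sums_head r (y + 0)
          · exact hc
        · intro hc; exact List.mem_cons.mpr (Or.inr hc)
      simp only [List.nil_append]
      congr 1
      · congr 1
        simp [hmem x (by omega)]
      · congr 1
        simp [hmem (x + 1) (by omega)]

-- ---------- the cuts set built by B's fold ----------

lemma pv_cuts_fold (arms : List Int) : ∀ (S : PySem.Set Int) (t x : Int),
    PySem.Set.contains
      ((arms.foldl (fun (p : PySem.Set Int × Int) a =>
          (PySem.Set.add p.1 (p.2 + a), p.2 + a)) (S, t)).1) x
      = (PySem.Set.contains S x || decide (x ∈ pvTailSums arms t)) := by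
  induction arms with
  | nil => intro S t x; simp [pvTailSums]
  | cons a r ih =>
    intro S t x
    simp only [List.foldl_cons]
    rw [ih]
    simp [pvTailSums, PySem.Set.mem_add]
    by_cases h1 : x ∈ S <;> by_cases h2 : x = t + a <;> simp [h1, h2]

lemma pv_sums_eq_cons_tail (arms : List Int) : ∀ v : Int,
    pvSums arms v = v :: pvTailSums arms v := by
  induction arms with
  | nil => intro v; rfl
  | cons a r ih => intro v; simp [pvSums, pvTailSums, ih (v + a)]

lemma pv_cuts_contains (arms : List Int) (v x : Int) :
    PySem.Set.contains
      ((arms.foldl (fun (p : PySem.Set Int × Int) a =>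
          (PySem.Set.add p.1 (p.2 + a), p.2 + a)) (PySem.Set.ofList [v], v)).1) x
      = decide (x ∈ pvSums arms v) := by
  rw [pv_cuts_fold, pv_sums_eq_cons_tail]
  simp [PySem.Set.mem_ofList]

-- ---------- the filter over the arm region picks exactly the positive starts ----------

lemma pv_filter_posStarts (arms : List Int) : ∀ v : Int, (∀ a ∈ arms, 0 ≤ a) →
    (PySem.List.pyRange v (v + arms.sum) 1).filter (fun w => decide (w ∈ pvSums arms v))
      = pvPosStarts arms v := by
  induction arms with
  | nil => intro v _; simp [pvPosStarts]
  | cons a r ih =>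
    intro v h
    have ha : (0:Int) ≤ a := h a (by simp)
    have hr : ∀ y ∈ r, (0:Int) ≤ y := fun y hy => h y (by simp [hy])
    have hsum : (0:Int) ≤ r.sum := List.sum_nonneg hr
    have hmin : ∀ y ∈ pvSums r (v + a), v + a ≤ y := fun y hy => pv_sums_min r (v + a) y hr hy
    have hsplit : PySem.List.pyRange v (v + (a :: r).sum) 1
        = PySem.List.pyRange v (v + a) 1 ++ PySem.List.pyRange (v + a) (v + (a :: r).sum) 1 :=
      PySem.List.pyRange_one_append v (v + a) _ (by omega) (by simp [List.sum_cons]; omega)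
    rw [hsplit, List.filter_append]
    have hpart1 : (PySem.List.pyRange v (v + a) 1).filter (fun w => decide (w ∈ pvSums (a :: r) v))
        = if 0 < a then [v] else [] := by
      by_cases hpos : 0 < a
      · rw [PySem.List.pyRange_one_cons (by omega)]
        rw [List.filter_cons]
        have hv : v ∈ pvSums (a :: r) v := pv_sums_head _ v
        rw [if_pos (by simpa using hv)]
        have : (PySem.List.pyRange (v + 1) (v + a) 1).filter (fun w => decide (w ∈ pvSums (a :: r) v)) = [] := by
          apply List.filter_eq_nil_iff.mpr
          intro w hw
          have hwr := PySem.List.mem_pyRange_one.mp hw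
          simp only [decide_eq_true_eq, pvSums, List.mem_cons]
          rintro (hc | hc)
          · omega
          · have := hmin w hc; omega
        rw [this, if_pos hpos]
      · have : v + a ≤ v := by omega
        rw [PySem.List.pyRange_one_eq_nil this, if_neg hpos]
        rfl
    have hpart2 : (PySem.List.pyRange (v + a) (v + (a :: r).sum) 1).filter
          (fun w => decide (w ∈ pvSums (a :: r) v))
        = pvPosStarts r (v + a) := by
      have harg : v + (a :: r).sum = (v + a) + r.sum := by simp [List.sum_cons]; ring
      rw [harg]
      rw [← ih (v + a) hr]
      apply List.filter_congr
      intro w hw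
      have hwr := PySem.List.mem_pyRange_one.mp hw
      simp only [pvSums, List.mem_cons]
      by_cases hwv : w = v
      · have ha0 : a = 0 := by omega
        subst ha0
        subst hwv
        simpa using pv_sums_head r (w + 0)
      · simp [hwv]
    rw [hpart1, hpart2]
    rfl

-- ---------- bounds of the concrete edge lists ----------

lemma pv_spoke_edges_bounds (k : Nat) : ∀ (v : Int) (e : Int × Int), 1 ≤ v →
    e ∈ pvSpokeEdges v k → e.1 = 0 ∧ v ≤ e.2 ∧ e.2 < v + k := by
  induction k with
  | zero => intro v e _ he; simp [pvSpokeEdges] at he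
  | succ k ih =>
    intro v e hv he
    simp only [pvSpokeEdges, List.mem_cons] at he
    rcases he with he | he
    · subst he; refine ⟨rfl, le_refl v, by push_cast; omega⟩
    · obtain ⟨h1, h2, h3⟩ := ih (v + 1) e (by omega) he
      exact ⟨h1, by omega, by omega⟩

lemma pv_chain_edges_bounds (k : Nat) : ∀ (p v : Int) (e : Int × Int), p < v →
    e ∈ pvChainEdges p v k → p ≤ e.1 ∧ e.1 < v + k ∧ v ≤ e.2 ∧ e.2 < v + k ∧ e.1 < e.2 := by
  induction k with
  | zero => intro p v e _ he; simp [pvChainEdges] at he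
  | succ k ih =>
    intro p v e hpv he
    simp only [pvChainEdges, List.mem_cons] at he
    rcases he with he | he
    · subst he; refine ⟨le_refl p, by omega, le_refl v, by omega, hpv⟩
    · obtain ⟨h1, h2, h3, h4, h5⟩ := ih v (v + 1) e (by omega) he
      exact ⟨by omega, by omega, by omega, by omega, h5⟩

lemma pv_arm_edges_bounds (arms : List Int) : ∀ (v : Int) (e : Int × Int),
    (∀ a ∈ arms, 0 ≤ a) → 1 ≤ v → e ∈ pvArmEdges arms v →
    0 ≤ e.1 ∧ e.1 < v + arms.sum ∧ v ≤ e.2 ∧ e.2 < v + arms.sum ∧ e.1 < e.2 := by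
  induction arms with
  | nil => intro v e _ _ he; simp [pvArmEdges] at he
  | cons a r ih =>
    intro v e h hv he
    have ha : (0:Int) ≤ a := h a (by simp)
    have hr : ∀ y ∈ r, (0:Int) ≤ y := fun y hy => h y (by simp [hy])
    have hsum : (0:Int) ≤ r.sum := List.sum_nonneg hr
    simp only [pvArmEdges, List.mem_append] at he
    rcases he with he | he
    · obtain ⟨h1, h2, h3, h4, h5⟩ := pv_chain_edges_bounds a.toNat 0 v e (by omega) he
      have hk : (a.toNat : Int) = a := Int.toNat_of_nonneg ha
      rw [hk] at h2 h4
      refine ⟨h1, by simp [List.sum_cons]; omega, h3, by simp [List.sum_cons]; omega, h5⟩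
    · obtain ⟨h1, h2, h3, h4, h5⟩ := ih (v + a) e hr (by omega) he
      refine ⟨h1, by simp [List.sum_cons] at *; omega, by omega, by simp [List.sum_cons] at *; omega, h5⟩

lemma pv_sum_nonpos (l : List Int) (h : ∀ x ∈ l, x ≤ 0) : l.sum ≤ 0 := by
  induction l with
  | nil => simp
  | cons a r ih =>
    have := h a (by simp)
    have := ih (fun x hx => h x (by simp [hx]))
    simp only [List.sum_cons]
    omega

lemma pv_all_zero (l : List Int) (h : ∀ x ∈ l, x ≤ 0) (hs : l.sum = 0) : ∀ x ∈ l, x = 0 := by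
  induction l with
  | nil => intro x hx; simp at hx
  | cons a r ih =>
    have ha := h a (by simp)
    have hr : ∀ x ∈ r, x ≤ 0 := fun x hx => h x (by simp [hx])
    have hrs := pv_sum_nonpos r hr
    simp only [List.sum_cons] at hs
    intro x hx
    rcases List.mem_cons.mp hx with hx | hx
    · omega
    · exact ih hr (by omega) x hx

lemma pv_foldl_step_nil (E : List (Int × Int)) : E.foldl pvStep [] = [] := by
  induction E with
  | nil => rfl
  | cons e E ih => simp only [List.foldl_cons, pvStep, pvAppendBoth, List.modify_nil]; exact ih

lemma pv_A_arms_nil (arms : List Int) : ∀ v : Int,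
    (arms.foldl (fun st a =>
        let inner := (List.range a.toNat).foldl
          (fun (q : List (List Int) × Int × Int) _ =>
            (pvAppendBoth q.1 q.2.1 q.2.2, q.2.2, q.2.2 + 1))
          (st.1, 0, st.2)
        (inner.1, inner.2.2)) (([] : List (List Int)), v)).1 = [] := by
  induction arms with
  | nil => intro v; rfl
  | cons a r ih =>
    intro v
    simp only [List.foldl_cons]
    rw [pv_A_inner]
    rw [pv_foldl_step_nil]
    exact ih _

lemma pv_setfold_length (f : Int → List Int) (l : List Int) : ∀ acc : List (List Int),
    (l.foldl (fun acc v => PySem.List.pySetD acc v (f v)) acc).length = acc.length := by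
  induction l with
  | nil => intro acc; rfl
  | cons v l ih => intro acc; rw [List.foldl_cons, ih, PySem.List.length_pySetD]

lemma pv_pySetD_nil (v : Int) (w : List Int) : PySem.List.pySetD ([] : List (List Int)) v w = [] := by
  simp only [PySem.List.pySetD, PySem.List.pySet?]
  cases PySem.List.pyIdx? ([] : List (List Int)).length v <;> simp

lemma pv_setfold_nil (f : Int → List Int) (l : List Int) :
    l.foldl (fun acc v => PySem.List.pySetD acc v (f v)) [] = [] := by
  induction l with
  | nil => rfl
  | cons v l ih =>
    rw [List.foldl_cons, pv_pySetD_nil, ih]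

lemma pv_setfold_getD (k : Nat) : ∀ (a b : Int) (f : Int → List Int) (acc : List (List Int)),
    (b - a).toNat = k → 0 ≤ a → b ≤ (acc.length : Int) → ∀ i : Nat, i < acc.length →
    ((PySem.List.pyRange a b 1).foldl (fun acc v => PySem.List.pySetD acc v (f v)) acc).getD i []
      = if a ≤ (i:Int) ∧ (i:Int) < b then f (i:Int) else acc.getD i [] := by
  induction k with
  | zero =>
    intro a b f acc hk ha hb i hi
    rw [PySem.List.pyRange_one_eq_nil (by omega), List.foldl_nil,
      if_neg (by omega : ¬ (a ≤ (i:Int) ∧ (i:Int) < b))]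
  | succ k ih =>
    intro a b f acc hk ha hb i hi
    have hab : a < b := by omega
    rw [PySem.List.pyRange_one_cons hab, List.foldl_cons,
      PySem.List.pySetD_of_nonneg acc (f a) ha]
    rw [ih (a+1) b f _ (by omega) (by omega) (by rw [List.length_set]; exact hb) i
      (by rw [List.length_set]; exact hi)]
    by_cases h1 : (a:Int) + 1 ≤ (i:Int) ∧ (i:Int) < b
    · rw [if_pos h1, if_pos (by omega)]
    · rw [if_neg h1]
      by_cases h2 : a ≤ (i:Int) ∧ (i:Int) < b
      · have hia : i = a.toNat := by omega
        rw [if_pos h2, List.getD_eq_getElem _ [] (by rw [List.length_set]; exact hi),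
          List.getElem_set, if_pos hia.symm]
        congr 1
        omega
      · rw [if_neg h2, List.getD_eq_getElem _ [] (by rw [List.length_set]; exact hi),
          List.getElem_set, if_neg (by omega), ← List.getD_eq_getElem _ [] hi]

-- ===== VERDICT (by name: the statement is the Claim_ definition above) =====
theorem build_multiarm_star_spec : Claim_equal_build_multiarm_star := by
  intro s arms _ hpre
  unfold Spec_build_multiarm_star build_multiarm_star build_multiarm_star_alt
  simp only []
  by_cases hneg : 1 + s + arms.sum ≤ 0
  · -- empty adjacency table: A's appends and B's writes all fall on []
    have h0 : (1 + s + arms.sum).toNat = 0 := Int.toNat_of_nonpos hneg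
    rw [h0]
    simp only [List.range_zero, List.map_nil]
    rw [if_neg (by omega : ¬ (0:Int) < 1 + s + arms.sum), pv_setfold_nil, pv_setfold_nil]
    rw [pv_A_spokes, pv_foldl_step_nil]
    exact Prod.ext rfl (pv_A_arms_nil arms _)
  obtain ⟨hs, harms⟩ : 0 ≤ s ∧ ∀ a ∈ arms, 0 ≤ a := by
    rcases hpre with h | ⟨hs2, harms2⟩
    · exact h
    · -- all-nonpositive with 1+s+sum = 1 forces s = 0 and every arm = 0
      have hsum := pv_sum_nonpos arms harms2
      have hsum0 : arms.sum = 0 := by omega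
      exact ⟨by omega, fun a ha => by have := pv_all_zero arms harms2 hsum0 a ha; omega⟩
  -- main branch: nonnegative star
  have hsum : (0:Int) ≤ arms.sum := List.sum_nonneg harms
  set n : Int := 1 + s + arms.sum with hn
  have hn1 : 1 ≤ n := by omega
  set adj0 : List (List Int) := (List.range n.toNat).map (fun _ => ([] : List Int)) with hadj0
  have hlen0 : adj0.length = n.toNat := by simp [hadj0]
  have hlen0' : (adj0.length : Int) = n := by rw [hlen0]; omega
  have hcuts : ∀ x : Int,
      PySem.Set.contains
        ((arms.foldl (fun (p : PySem.Set Int × Int) a =>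
            (PySem.Set.add p.1 (p.2 + a), p.2 + a)) (PySem.Set.ofList [1 + s], 1 + s)).1) x
        = decide (x ∈ pvSums arms (1 + s)) := fun x => pv_cuts_contains arms (1 + s) x
  -- name B's intermediate tables
  set hubT : List Int := PySem.List.pyRange 1 (s + 1) 1
      ++ (PySem.List.pyRange (s + 1) n 1).filter (fun w =>
        PySem.Set.contains
          ((arms.foldl (fun (p : PySem.Set Int × Int) a =>
              (PySem.Set.add p.1 (p.2 + a), p.2 + a)) (PySem.Set.ofList [1 + s], 1 + s)).1) w)
    with hhub
  set adj2T : List (List Int) := if 0 < n then PySem.List.pySetD adj0 0 hubT else adj0 with hadj2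
  set adj3T : List (List Int) :=
    (PySem.List.pyRange 1 (s + 1) 1).foldl (fun acc v => PySem.List.pySetD acc v [0]) adj2T
    with hadj3
  have h2 : adj2T = PySem.List.pySetD adj0 0 hubT := by
    rw [hadj2, if_pos (by omega : (0:Int) < n)]
  have hlen2 : adj2T.length = n.toNat := by rw [h2, PySem.List.length_pySetD, hlen0]
  have hlen3 : adj3T.length = n.toNat := by rw [hadj3, pv_setfold_length, hlen2]
  -- A's loops are a single fold of pvStep over the explicit edge list
  rw [pv_A_spokes, pv_A_arms arms _ _ harms]
  have hcast : (1:Int) + (s.toNat : Int) = 1 + s := by omega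
  rw [hcast, ← List.foldl_append]
  set E : List (Int × Int) := pvSpokeEdges 1 s.toNat ++ pvArmEdges arms (1 + s) with hE
  have hEb : ∀ e ∈ E, 0 ≤ e.1 ∧ e.1 < (adj0.length : Int) ∧ 0 ≤ e.2 ∧ e.2 < (adj0.length : Int) ∧ e.1 ≠ e.2 := by
    intro e he
    rw [hlen0']
    rcases List.mem_append.mp he with he | he
    · obtain ⟨h1, h2, h3⟩ := pv_spoke_edges_bounds s.toNat 1 e (le_refl 1) he
      refine ⟨by omega, by omega, by omega, by omega, by omega⟩
    · obtain ⟨h1, h2, h3, h4, h5⟩ := pv_arm_edges_bounds arms (1 + s) e harms (by omega) he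
      refine ⟨h1, by omega, by omega, by omega, by omega⟩
  refine Prod.ext rfl ?_
  apply List.ext_getElem
  · rw [pv_length_fold, hlen0, pv_setfold_length, hlen3]
  intro i hiL hiR
  have hi : i < n.toNat := by rwa [pv_length_fold, hlen0] at hiL
  have hiI : (i : Int) < n := by omega
  -- left side: the fold's entry is the contribution of vertex i
  have hgl : (E.foldl pvStep adj0)[i]'hiL = (E.foldl pvStep adj0).getD i [] :=
    (List.getD_eq_getElem _ [] hiL).symm
  rw [hgl, pv_fold_getD E adj0 hEb i (by omega)]
  have hadj0i : adj0.getD i [] = [] := by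
    rw [List.getD_eq_getElem _ [] (by omega : i < adj0.length)]
    simp [hadj0]
  rw [hadj0i, List.nil_append, hE, pv_contrib_append]
  -- right side: each row was written exactly once
  rw [← List.getD_eq_getElem _ ([] : List Int) hiR]
  rw [pv_setfold_getD ((n - (s+1)).toNat) (s+1) n _ _ rfl (by omega)
    (by rw [hlen3]; omega) i (by rw [hlen3]; exact hi)]
  rw [hadj3, pv_setfold_getD ((s+1-1).toNat) 1 (s+1) _ _ rfl (by omega)
    (by rw [hlen2]; omega) i (by rw [hlen2]; exact hi)]
  by_cases h0 : (i : Int) = 0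
  · -- the hub
    rw [if_neg (by omega), if_neg (by omega)]
    have hg2 : adj2T.getD i [] = hubT := by
      rw [h2, PySem.List.pySetD_of_nonneg adj0 hubT (le_refl (0:Int))]
      rw [List.getD_eq_getElem _ [] (by rw [List.length_set]; omega : i < (adj0.set (0:Int).toNat hubT).length)]
      rw [List.getElem_set, if_pos (by omega : (0:Int).toNat = i)]
    rw [hg2, hhub, h0]
    rw [pv_contrib_spokes_hub s.toNat 1 (le_refl 1),
      pv_contrib_arms_hub arms (1 + s) harms (by omega)]
    have h1 : (1:Int) + (s.toNat:Int) = s + 1 := by omega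
    rw [h1]
    congr 1
    have h3 : n = (1 + s) + arms.sum := by omega
    rw [show s + 1 = 1 + s from by ring, h3,
      ← pv_filter_posStarts arms (1 + s) harms]
    apply List.filter_congr
    intro w _
    rw [hcuts w]
  · by_cases hsp : (i : Int) ≤ s
    · -- a spoke vertex
      rw [if_neg (by omega), if_pos (by omega)]
      rw [pv_contrib_spokes s.toNat 1 (i:Int) (le_refl 1) h0,
        if_pos (by constructor <;> omega),
        pv_contrib_arms_empty arms (1 + s) (i:Int) harms h0 (by omega)]
      rfl
    · -- an arm vertex
      rw [if_pos (by omega)]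
      rw [pv_contrib_spokes s.toNat 1 (i:Int) (le_refl 1) h0,
        if_neg (by omega),
        pv_contrib_arms arms (1 + s) (i:Int) harms (by omega) (by omega) (by omega)]
      rw [hcuts, hcuts]
      by_cases hm1 : (i:Int) ∈ pvSums arms (1 + s)
        <;> by_cases hm2 : (i:Int) + 1 ∈ pvSums arms (1 + s)
        <;> simp [hm1, hm2]
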